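-- pv_equiv track=rewrite | github.com/davebrent/dbp | scripts/rhythms.py | adjacent_edges
-- ===== SOURCE A (Python) =====
-- def adjacent_edges(rhythm):
--     """Return the number of opposing pulses that when joined (when the rhythm
--     is drawn on a circle) create isocoles triangles, indicating that there
--     are two adjacent inter-onset intervals of the same duration.
--
--     A higher number indicates a certain level of regularity in the rhythm.
--
--     (Godfried Toussaint, Geometry of musical rhythm. Page 34)
--
--     >>> adjacent_edges([1, 0, 0, 1, 0, 0, 1, 0, 0, 0, 1, 0, 0, 0, 1, 0])
--     2
--     >>> adjacent_edges([1, 0, 0, 1, 0, 0, 1, 0, 0, 0, 1, 0, 0, 1, 0, 0])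
--     3
--
--     """
--     edges = 0
--     indices = [o for o, p in enumerate(rhythm) if p == 1]
--     ntuples = lambda lst, n: zip(*[lst[i:] + lst[:i] for i in range(n)])
--
--     for onsets in ntuples(indices, 3):
--         diff = [j-i for i, j in zip(onsets[:-1], onsets[1:])]
--         diff = map(lambda num: num % len(rhythm), diff)
--
--         if len(set(diff)) == 1:
--             edges += 1
--
--     return edges
-- ===== SOURCE B (Python) =====
-- def adjacent_edges(rhythm):
--     n = len(rhythm)
--     # One pass: collect inter-onset gaps directly (no index list, no modulo),
--     # remembering the first and last onset positions for the wrap-around gap.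
--     gaps = []
--     first = None
--     last = None
--     for pos, p in enumerate(rhythm):
--         if p == 1:
--             if last is None:
--                 first = pos
--             else:
--                 gaps.append(pos - last)
--             last = pos
--     if last is None:
--         return 0
--     gaps.append(first + n - last)
--     # Run-length encode the gap sequence.
--     runs = []
--     cur = gaps[0]
--     cnt = 0
--     for g in gaps:
--         if g == cur:
--             cnt += 1
--         else:
--             runs.append((cur, cnt))
--             cur = g
--             cnt = 1
--     runs.append((cur, cnt))
--     # A single circular run means every adjacency matches.
--     if len(runs) == 1:
--         return len(gaps)
--     # Merge the wrap-around run, then each run of length c yields c-1 adjacencies.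
--     if runs[0][0] == runs[-1][0]:
--         runs = [(runs[0][0], runs[0][1] + runs[-1][1])] + runs[1:-1]
--     return sum(c - 1 for _, c in runs)
-- ===== Notes on version B (the rewrite author's own statement) =====
-- stated objective: alternative
-- what changed: B replaces A's rotated-copies zip of index triples (with a per-triple modular-difference set test) by a single pass that collects inter-onset gaps directly (no index list, no per-pair modulo), run-length encodes the gap sequence, merges the wrap-around run, and returns sum(run_length-1) (or k for a single circular run).
import Mathlib
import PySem

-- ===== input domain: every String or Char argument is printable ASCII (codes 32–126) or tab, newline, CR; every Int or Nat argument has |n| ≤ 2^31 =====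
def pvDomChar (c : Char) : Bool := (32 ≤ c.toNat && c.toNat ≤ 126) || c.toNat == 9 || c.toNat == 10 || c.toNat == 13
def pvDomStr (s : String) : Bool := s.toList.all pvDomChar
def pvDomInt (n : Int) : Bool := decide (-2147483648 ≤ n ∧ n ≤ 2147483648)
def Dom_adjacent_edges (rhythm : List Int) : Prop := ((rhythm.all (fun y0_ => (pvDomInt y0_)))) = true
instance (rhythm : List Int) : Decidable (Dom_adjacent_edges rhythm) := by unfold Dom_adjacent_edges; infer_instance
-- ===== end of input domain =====

-- B replaces A's rotated-triple zip by a one-pass gap collection followed by run-length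
-- encoding of the gap sequence (merge the wrap run, sum run_length-1) — an alternative algorithm.

-- ===== PORT A =====
def adjacent_edges (rhythm : List Int) : Int :=
  let indices : List Int :=
    (PySem.List.enumerate rhythm).foldl
      (fun acc op => if op.2 == 1 then acc ++ [op.1] else acc) []
  let rot0 := PySem.List.slice indices (some 0) none ++ PySem.List.slice indices none (some 0)
  let rot1 := PySem.List.slice indices (some 1) none ++ PySem.List.slice indices none (some 1)
  let rot2 := PySem.List.slice indices (some 2) none ++ PySem.List.slice indices none (some 2)
  (rot0.zip (rot1.zip rot2)).foldl
    (fun edges t =>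
      let diff := [t.2.1 - t.1, t.2.2 - t.2.1]
      let diff := diff.map (fun num => PySem.Int.mod num (rhythm.length : Int))
      if PySem.Set.len (PySem.Set.ofList diff) == 1 then edges + 1 else edges) 0

-- ===== PORT B =====
def adjacent_edges_alt (rhythm : List Int) : Int :=
  let n : Int := (rhythm.length : Int)
  -- one pass: state = (gaps, first, last)
  let st := (PySem.List.enumerate rhythm).foldl
      (fun (st : List Int × Option Int × Option Int) (pp : Int × Int) =>
        if pp.2 == 1 then
          match st.2.2 with
          | none => (st.1, some pp.1, some pp.1)
          | some l => (st.1 ++ [pp.1 - l], st.2.1, some pp.1)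
        else st)
      ([], none, none)
  match st.2.2 with
  | none => 0
  | some last =>
    let first := st.2.1.getD 0      -- in Python `first` is an int whenever `last` is
    let gaps := st.1 ++ [first + n - last]
    -- run-length encode gaps (gaps is nonempty here; gaps[0] ported as headD)
    let rst := gaps.foldl
      (fun (s : List (Int × Int) × Int × Int) g =>
        if g == s.2.1 then (s.1, s.2.1, s.2.2 + 1)
        else (s.1 ++ [(s.2.1, s.2.2)], g, 1))
      ([], gaps.headD 0, 0)
    let runs := rst.1 ++ [(rst.2.1, rst.2.2)]
    if runs.length == 1 then (gaps.length : Int)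
    else
      let runs :=
        if (runs.headD (0, 0)).1 == (runs.getLastD (0, 0)).1 then
          ((runs.headD (0, 0)).1, (runs.headD (0, 0)).2 + (runs.getLastD (0, 0)).2)
            :: (runs.drop 1).dropLast
        else runs
      runs.foldl (fun acc vc => acc + (vc.2 - 1)) 0

-- ===== PRECONDITION & SPEC =====
def Spec_adjacent_edges (rhythm : List Int) (out : Int) : Prop := out = adjacent_edges_alt rhythm
instance (rhythm : List Int) (out : Int) : Decidable (Spec_adjacent_edges rhythm out) := by unfold Spec_adjacent_edges; infer_instance

-- ===== CLAIM (what is proved, stated in full; the proofs are below) =====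
def Claim_equal_adjacent_edges : Prop := ∀ (rhythm : List Int), Dom_adjacent_edges rhythm → Spec_adjacent_edges rhythm (adjacent_edges rhythm)

-- ===== LEMMAS AND PROOFS =====

-- ---- proof-side helper functions ----

-- the onset-index list
def idxOf (rhythm : List Int) : List Int :=
  (PySem.List.enumerate rhythm).filterMap (fun op => if op.2 == 1 then some op.1 else none)

-- the cyclic gap list as A sees it (modular differences of cyclically adjacent indices)
def gapsOf (L : List Int) (n : Int) : List Int :=
  (List.range L.length).map
    (fun i => PySem.Int.mod (L.getD ((i + 1) % L.length) 0 - L.getD i 0) n)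

-- number of cyclically adjacent equal pairs
def circN (g : List Int) : Nat :=
  ((List.range g.length).filter
    (fun i => g.getD i 0 == g.getD ((i + 1) % g.length) 0)).length

-- number of linearly adjacent equal pairs
def linCount : List Int → Nat
  | a :: b :: t => (if a = b then 1 else 0) + linCount (b :: t)
  | _ => 0

-- run-length encoding, spec form
def rleAux (v c : Int) : List Int → List (Int × Int)
  | [] => [(v, c)]
  | g :: t => if g = v then rleAux v (c + 1) t else (v, c) :: rleAux g 1 t

def sumC : List (Int × Int) → Int
  | [] => 0
  | p :: r => p.2 + sumC r

-- successive differences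
def diffsFrom (l : Int) : List Int → List Int
  | [] => []
  | x :: t => (x - l) :: diffsFrom x t

-- ---- A-side lemmas (A = circN of the modular gap list) ----

theorem filterMap_if_eq_map_filter (l : List (Int × Int)) :
    l.filterMap (fun op => if op.2 == 1 then some op.1 else none)
      = (l.filter (fun op => op.2 == 1)).map (fun op => op.1) := by
  induction l with
  | nil => rfl
  | cons h t ih =>
    cases hh : (h.2 == 1)
    · rw [List.filterMap_cons_none (by simp [hh]), List.filter_cons_of_neg (by simp [hh])]
      exact ih
    · rw [List.filterMap_cons_some (b := h.1) (by simp [hh]),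
        List.filter_cons_of_pos (by simpa using hh), List.map_cons, ih]

theorem setPair_len (x y : Int) :
    (PySem.Set.len (PySem.Set.ofList [x, y]) == 1) = (x == y) := by
  by_cases h : x = y
  · simp [PySem.Set.ofList, PySem.Set.add, PySem.Set.contains, PySem.Set.len, PySem.Set.empty, h]
  · have h' : ¬ (y = x) := fun hh => h hh.symm
    simp [PySem.Set.ofList, PySem.Set.add, PySem.Set.contains, PySem.Set.len, PySem.Set.empty, h, h']

theorem rot_getElem (L : List Int) (j i : Nat) (hj : j ≤ L.length) (hi : i < L.length)
    (h : i < (L.drop j ++ L.take j).length) :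
    (L.drop j ++ L.take j)[i] = L.getD ((i + j) % L.length) 0 := by
  have hd : (L.drop j).length = L.length - j := List.length_drop
  have ht : (L.take j).length = j := by rw [List.length_take]; omega
  by_cases hc : i < L.length - j
  · have hij : i + j < L.length := by omega
    rw [List.getElem_append_left (by omega), List.getElem_drop, Nat.mod_eq_of_lt hij,
      List.getD_eq_getElem _ _ hij]
    congr 1; omega
  · have h2 : L.length ≤ i + j := by omega
    have h1 : i + j - L.length < L.length := by omega
    rw [List.getElem_append_right (by omega), List.getElem_take,
      show (i + j) % L.length = i + j - L.length from by
        rw [Nat.mod_eq_sub_mod h2, Nat.mod_eq_of_lt h1],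
      List.getD_eq_getElem _ _ h1]
    congr 1; omega

theorem zip_rots_eq (L : List Int) :
    L.zip ((L.drop 1 ++ L.take 1).zip (L.drop 2 ++ L.take 2))
      = (List.range L.length).map
          (fun i => (L.getD i 0, L.getD ((i + 1) % L.length) 0, L.getD ((i + 2) % L.length) 0)) := by
  match L with
  | [] => rfl
  | [a] => simp
  | a :: b :: t =>
    set M := a :: b :: t with hM
    have h1 : 1 ≤ M.length := by simp [hM]
    have h2 : 2 ≤ M.length := by simp [hM]
    apply List.ext_getElem
    · simp; omega
    · intro i h₁ h₂
      have hi : i < M.length := by simp at h₁; omega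
      rw [List.getElem_zip, List.getElem_zip, List.getElem_map, List.getElem_range]
      rw [rot_getElem M 1 i h1 hi, rot_getElem M 2 i h2 hi, List.getD_eq_getElem _ _ hi]

-- A equals the circular adjacent-equality count of the modular gap list
theorem A_eq_circ (rhythm : List Int) :
    adjacent_edges rhythm = (circN (gapsOf (idxOf rhythm) (rhythm.length : Int)) : Int) := by
  unfold adjacent_edges circN gapsOf idxOf
  simp only [filterMap_if_eq_map_filter, PySem.List.foldl_append_if, List.nil_append]
  set L : List Int := ((PySem.List.enumerate rhythm).filter (fun op => op.2 == 1)).map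
    (fun op => op.1) with hL
  set n : Int := (rhythm.length : Int) with hn
  rw [show PySem.List.slice L (some 0) none = L from by simp [pysem],
    show PySem.List.slice L none (some 0) = [] from by simp [pysem],
    show PySem.List.slice L (some 1) none = L.drop 1 from by simp [pysem],
    show PySem.List.slice L none (some 1) = L.take 1 from by simp [pysem],
    show PySem.List.slice L (some 2) none = L.drop 2 from by simp [pysem],
    show PySem.List.slice L none (some 2) = L.take 2 from by simp [pysem],
    List.append_nil, zip_rots_eq L, PySem.List.foldl_count_if, List.countP_map,
    ← List.countP_eq_length_filter]
  simp only [zero_add, List.length_map, List.length_range]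
  congr 1
  apply List.countP_congr
  intro i hi
  have hik : i < L.length := List.mem_range.mp hi
  have hk0 : 0 < L.length := Nat.lt_of_le_of_lt (Nat.zero_le _) hik
  have h1k : (i + 1) % L.length < L.length := Nat.mod_lt _ hk0
  simp only [Function.comp_apply, List.map_cons, List.map_nil]
  rw [PySem.List.getD_map_range _ _ _ _ hik, PySem.List.getD_map_range _ _ _ _ h1k,
    setPair_len]
  have hmod : ((i + 1) % L.length + 1) % L.length = (i + 2) % L.length := by
    rw [Nat.mod_add_mod]
  rw [hmod]

-- ---- pure combinatorics: circular count vs run-length encoding ----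

theorem rleAux_cons_eq (v c g : Int) (t : List Int) (h : g = v) :
    rleAux v c (g :: t) = rleAux v (c + 1) t := by simp [rleAux, h]

theorem rleAux_cons_ne (v c g : Int) (t : List Int) (h : ¬ g = v) :
    rleAux v c (g :: t) = (v, c) :: rleAux g 1 t := by simp [rleAux, h]

theorem rleAux_ne_nil (t : List Int) (v c : Int) : rleAux v c t ≠ [] := by
  induction t generalizing v c with
  | nil => simp [rleAux]
  | cons g t ih => by_cases h : g = v <;> simp [rleAux, h, ih]

theorem rleAux_head (t : List Int) (v c : Int) : (((rleAux v c t).head?).getD (0, 0)).1 = v := by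
  induction t generalizing v c with
  | nil => simp [rleAux]
  | cons g t ih =>
    by_cases h : g = v
    · subst h; rw [rleAux_cons_eq g c g t rfl]; exact ih g (c + 1)
    · simp [rleAux, h]

theorem rleAux_last (t : List Int) (v c : Int) :
    (((rleAux v c t).getLast?).getD (0, 0)).1 = ((v :: t).getLast?).getD 0 := by
  induction t generalizing v c with
  | nil => simp [rleAux]
  | cons g t ih =>
    by_cases h : g = v
    · subst h
      rw [rleAux_cons_eq g c g t rfl, ih g (c + 1), List.getLast?_cons_cons]
    · rw [rleAux_cons_ne v c g t h]
      obtain ⟨p, r, hpr⟩ := List.exists_cons_of_ne_nil (rleAux_ne_nil t g 1)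
      rw [hpr, List.getLast?_cons_cons, ← hpr, ih g 1, List.getLast?_cons_cons]

theorem rleAux_len (t : List Int) (v c : Int) :
    linCount (v :: t) + (rleAux v c t).length = t.length + 1 := by
  induction t generalizing v c with
  | nil => simp [rleAux, linCount]
  | cons g t ih =>
    by_cases h : g = v
    · subst h; rw [rleAux_cons_eq g c g t rfl]
      simp [linCount]
      have := ih g (c + 1); omega
    · rw [rleAux_cons_ne v c g t h]
      simp only [linCount, if_neg (Ne.symm h), List.length_cons]
      have := ih g 1; omega

theorem rleAux_sum (t : List Int) (v c : Int) :
    sumC (rleAux v c t) = c + (t.length : Int) := by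
  induction t generalizing v c with
  | nil => simp [rleAux, sumC]
  | cons g t ih =>
    by_cases h : g = v
    · rw [rleAux_cons_eq v c g t h, ih]; simp only [List.length_cons]; push_cast; ring
    · rw [rleAux_cons_ne v c g t h]; simp only [sumC, List.length_cons]; rw [ih]; push_cast; ring

theorem sumC_append (l1 l2 : List (Int × Int)) : sumC (l1 ++ l2) = sumC l1 + sumC l2 := by
  induction l1 with
  | nil => simp [sumC]
  | cons p l ih => simp [sumC, ih]; ring

theorem foldl_sumC (r : List (Int × Int)) (x : Int) :
    r.foldl (fun acc vc => acc + (vc.2 - 1)) x = x + sumC r - (r.length : Int) := by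
  induction r generalizing x with
  | nil => simp [sumC]
  | cons p r ih => simp only [List.foldl_cons, sumC, List.length_cons, ih]; push_cast; ring

theorem rle_foldl (l : List Int) (rs : List (Int × Int)) (v c : Int) :
    (let s := l.foldl
        (fun (s : List (Int × Int) × Int × Int) g =>
          if g == s.2.1 then (s.1, s.2.1, s.2.2 + 1)
          else (s.1 ++ [(s.2.1, s.2.2)], g, 1)) (rs, v, c) ;
      s.1 ++ [(s.2.1, s.2.2)]) = rs ++ rleAux v c l := by
  induction l generalizing rs v c with
  | nil => simp [rleAux]
  | cons g t ih =>
    by_cases h : g = v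
    · rw [rleAux_cons_eq v c g t h]
      simpa [h] using ih rs v (c + 1)
    · rw [rleAux_cons_ne v c g t h]
      simpa [h] using ih (rs ++ [(v, c)]) g 1

theorem lin_filter (g : List Int) :
    (List.range (g.length - 1)).countP
      (fun i => g.getD i 0 == g.getD (i + 1) 0) = linCount g := by
  induction g with
  | nil => rfl
  | cons a t ih =>
    cases t with
    | nil => rfl
    | cons b t' =>
      have hp : ((fun i => (a :: b :: t').getD i 0 == (a :: b :: t').getD (i + 1) 0) ∘ Nat.succ)
          = (fun i => (b :: t').getD i 0 == (b :: t').getD (i + 1) 0) := by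
        funext i; simp [List.getD_cons_succ]
      simp only [List.length_cons, Nat.add_sub_cancel] at ih ⊢
      rw [List.range_succ_eq_map, List.countP_cons, List.countP_map, hp, ih]
      by_cases hab : a = b <;> simp [linCount, hab] <;> omega

theorem circ_split (a : Int) (t : List Int) :
    circN (a :: t)
      = linCount (a :: t) + (if (a :: t).getLastD 0 = a then 1 else 0) := by
  unfold circN
  rw [← List.countP_eq_length_filter]
  simp only [List.length_cons]
  rw [List.range_succ, List.countP_append,
    List.countP_congr (fun i hi => by
      have : i < t.length := List.mem_range.mp hi
      rw [Nat.mod_eq_of_lt (by omega)]),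
    show (List.range t.length).countP
        (fun i => (a :: t).getD i 0 == (a :: t).getD (i + 1) 0) = linCount (a :: t) from by
      simpa using lin_filter (a :: t)]
  congr 1
  have hlast : (a :: t)[t.length]'(by simp) = (a :: t).getLast?.getD 0 := by
    rw [List.getLast?_eq_getElem?]
    simp
  simp [Nat.mod_self, beq_iff_eq, List.getLastD_eq_getLast?, hlast]

-- the whole tail computation of B on a nonempty gap list computes circN
theorem rle_formula (a : Int) (t : List Int) (r : List (Int × Int)) (hr : r = rleAux a 1 t) :
    (if r.length == 1 then ((t.length : Int) + 1)
     else if (r.headD (0, 0)).1 == (r.getLastD (0, 0)).1 then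
       (((r.headD (0, 0)).1, (r.headD (0, 0)).2 + (r.getLastD (0, 0)).2)
          :: (r.drop 1).dropLast).foldl (fun acc vc => acc + (vc.2 - 1)) 0
     else r.foldl (fun acc vc => acc + (vc.2 - 1)) 0)
    = (circN (a :: t) : Int) := by
  have hne : r ≠ [] := hr ▸ rleAux_ne_nil t a 1
  have hhead : ((r.head?).getD (0, 0)).1 = a := hr ▸ rleAux_head t a 1
  have hlast : ((r.getLast?).getD (0, 0)).1 = ((a :: t).getLast?).getD 0 := hr ▸ rleAux_last t a 1
  have hlen : linCount (a :: t) + r.length = t.length + 1 := hr ▸ rleAux_len t a 1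
  have hsum : sumC r = 1 + (t.length : Int) := hr ▸ rleAux_sum t a 1
  have hcirc := circ_split a t
  obtain ⟨p, rest, hp⟩ := List.exists_cons_of_ne_nil hne
  by_cases h1 : r.length = 1
  · rw [if_pos (by simpa using h1)]
    have hrest : rest = [] := by
      rw [hp] at h1; simpa using h1
    subst hrest
    have hind : (a :: t).getLastD 0 = a := by
      rw [List.getLastD_eq_getLast?, ← hlast, ← hhead, hp]
      rfl
    rw [hcirc, if_pos hind]
    push_cast
    omega
  · rw [if_neg (by simpa using h1)]
    have hrest : rest ≠ [] := by
      intro h; rw [hp, h] at h1; simp at h1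
    obtain ⟨t₂, q, hq⟩ := (List.eq_nil_or_concat rest).resolve_left hrest
    rw [hq] at hp
    have hp' : r = (p :: t₂) ++ [q] := by rw [hp]; simp
    have hhd : r.headD (0, 0) = p := by rw [hp]; rfl
    have hlst : r.getLastD (0, 0) = q := by
      rw [List.getLastD_eq_getLast?, hp', List.getLast?_concat]; rfl
    have hdrop : (r.drop 1).dropLast = t₂ := by
      rw [hp]; simp [List.dropLast_concat]
    have hsumr : sumC r = p.2 + sumC t₂ + q.2 := by
      rw [hp', sumC_append]; simp [sumC]
    have hlenr : r.length = t₂.length + 2 := by rw [hp']; simp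
    have hha : p.1 = a := by rw [hp] at hhead; exact hhead
    have hla : q.1 = ((a :: t).getLast?).getD 0 := by
      rw [hp', List.getLast?_concat] at hlast; exact hlast
    by_cases h2 : p.1 = q.1
    · rw [hhd, hlst, if_pos (by simpa using h2), hdrop, foldl_sumC]
      have hind : (a :: t).getLastD 0 = a := by
        rw [List.getLastD_eq_getLast?, ← hla, ← h2, hha]
      rw [hcirc, if_pos hind]
      simp only [sumC, List.length_cons]
      have e1 : p.2 + q.2 + sumC t₂ = 1 + (t.length : Int) := by
        rw [← hsum, hsumr]; ring
      push_cast
      omega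
    · rw [hhd, hlst, if_neg (by simpa using h2), foldl_sumC]
      have hind : ¬ ((a :: t).getLastD 0 = a) := by
        rw [List.getLastD_eq_getLast?, ← hla, ← hha]
        exact fun hh => h2 hh.symm
      rw [hcirc, if_neg hind]
      have e1 : sumC r = 1 + (t.length : Int) := hsum
      push_cast
      omega

-- ---- B-side lemmas (the scan produces the gap list) ----

theorem scan_filter (ps : List (Int × Int)) (init : List Int × Option Int × Option Int) :
    ps.foldl
      (fun (st : List Int × Option Int × Option Int) (pp : Int × Int) =>
        if pp.2 == 1 then
          match st.2.2 with
          | none => (st.1, some pp.1, some pp.1)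
          | some l => (st.1 ++ [pp.1 - l], st.2.1, some pp.1)
        else st) init
    = (ps.filterMap (fun op => if op.2 == 1 then some op.1 else none)).foldl
      (fun (st : List Int × Option Int × Option Int) x =>
        match st.2.2 with
        | none => (st.1, some x, some x)
        | some l => (st.1 ++ [x - l], st.2.1, some x)) init := by
  induction ps generalizing init with
  | nil => rfl
  | cons p t ih =>
    by_cases h : p.2 = 1
    · rw [List.foldl_cons, List.filterMap_cons]
      simp only [show (p.2 == 1) = true from by simp [h], if_pos rfl, List.foldl_cons]
      exact ih _
    · rw [List.foldl_cons, List.filterMap_cons]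
      simp only [show (p.2 == 1) = false from by simp [h], Bool.false_eq_true, if_false]
      exact ih init

theorem scan_diffs (rest : List Int) (gaps : List Int) (f l : Int) :
    rest.foldl
      (fun (st : List Int × Option Int × Option Int) x =>
        match st.2.2 with
        | none => (st.1, some x, some x)
        | some l => (st.1 ++ [x - l], st.2.1, some x)) (gaps, some f, some l)
    = (gaps ++ diffsFrom l rest, some f, some ((l :: rest).getLastD 0)) := by
  induction rest generalizing gaps l with
  | nil => simp [diffsFrom, List.getLastD_cons]
  | cons x t ih => simp [diffsFrom, ih, List.getLastD_cons]

theorem diffsFrom_length (l : Int) (t : List Int) : (diffsFrom l t).length = t.length := by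
  induction t generalizing l with
  | nil => rfl
  | cons x t ih => simp [diffsFrom, ih]

theorem diffsFrom_getD (t : List Int) (l : Int) (i : Nat) (h : i < t.length) :
    (diffsFrom l t).getD i 0 = (l :: t).getD (i + 1) 0 - (l :: t).getD i 0 := by
  induction t generalizing l i with
  | nil => simp at h
  | cons x t ih =>
    cases i with
    | zero => simp [diffsFrom]
    | succ j =>
      simp only [diffsFrom, List.getD_cons_succ]
      exact ih x j (by simpa using h)

-- idxOf is strictly increasing and bounded by the length
theorem idxOf_mono (rhythm : List Int) : (idxOf rhythm).Pairwise (· < ·) := by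
  unfold idxOf
  rw [filterMap_if_eq_map_filter, List.pairwise_map]
  exact (PySem.List.pairwise_lt_enumerate rhythm 0).sublist (List.filter_sublist)

theorem idxOf_bounds (rhythm : List Int) (x : Int) (hx : x ∈ idxOf rhythm) :
    0 ≤ x ∧ x < (rhythm.length : Int) := by
  unfold idxOf at hx
  rw [filterMap_if_eq_map_filter] at hx
  obtain ⟨op, hop, rfl⟩ := List.mem_map.mp hx
  have hmem := List.mem_of_mem_filter hop
  obtain ⟨k, hk, hop2⟩ := (PySem.List.mem_enumerate_iff rhythm 0 op).mp hmem
  rw [hop2]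
  constructor
  · simp
  · simpa using hk

-- on a nonempty index list with at least two entries, B's gaps equal A's modular gap list
theorem gaps_eq (rhythm : List Int) (x : Int) (rest : List Int)
    (hL : idxOf rhythm = x :: rest) (hrest : rest ≠ []) :
    diffsFrom x rest ++ [x + (rhythm.length : Int) - (x :: rest).getLastD 0]
      = gapsOf (idxOf rhythm) (rhythm.length : Int) := by
  have hmono := List.pairwise_iff_getElem.mp (hL ▸ idxOf_mono rhythm)
  have hbnd : ∀ y ∈ (x :: rest), 0 ≤ y ∧ y < (rhythm.length : Int) := by
    intro y hy; exact idxOf_bounds rhythm y (hL ▸ hy)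
  have hn : 0 < (rhythm.length : Int) := by
    have := hbnd x (by simp); omega
  rw [hL]
  have hr0 : 0 < rest.length := List.length_pos_of_ne_nil hrest
  have hgd : ∀ (j : Nat) (hj : j < (x :: rest).length),
      (x :: rest).getD j 0 = (x :: rest)[j]'hj :=
    fun j hj => List.getD_eq_getElem _ _ hj
  have hlastD : (x :: rest).getLastD 0
      = (x :: rest)[rest.length]'(by simp) := by
    rw [List.getLastD_eq_getLast?, List.getLast?_eq_getElem?]
    simp
  apply List.ext_getElem
  · simp [gapsOf, diffsFrom_length]
  · intro i h1 h2
    have hi : i < rest.length + 1 := by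
      simpa [diffsFrom_length] using h1
    simp only [gapsOf, List.getElem_map, List.getElem_range, List.length_cons]
    rcases Nat.lt_or_ge i rest.length with hc | hc
    · rw [List.getElem_append_left (by rw [diffsFrom_length]; exact hc)]
      have e1 : (diffsFrom x rest)[i]'(by rw [diffsFrom_length]; exact hc)
          = (diffsFrom x rest).getD i 0 :=
        (List.getD_eq_getElem _ _ _).symm
      rw [e1, diffsFrom_getD rest x i hc, Nat.mod_eq_of_lt (by omega)]
      have ha : (x :: rest).getD i 0 < (x :: rest).getD (i + 1) 0 := by
        rw [hgd i (by simp; omega), hgd (i + 1) (by simp; omega)]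
        exact hmono i (i + 1) (by simpa using (by omega : i < rest.length + 1))
          (by simpa using (by omega : i + 1 < rest.length + 1)) (by omega)
      have hb0 : 0 ≤ (x :: rest).getD i 0 := by
        rw [hgd i (by simp; omega)]
        exact (hbnd _ (List.getElem_mem _)).1
      have hb1 : (x :: rest).getD (i + 1) 0 < (rhythm.length : Int) := by
        rw [hgd (i + 1) (by simp; omega)]
        exact (hbnd _ (List.getElem_mem _)).2
      rw [PySem.Int.mod_eq_emod_of_pos hn]
      rw [Int.emod_eq_of_lt (by omega) (by omega)]
    · have hie : i = rest.length := by omega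
      subst hie
      rw [List.getElem_append_right (by rw [diffsFrom_length])]
      simp only [diffsFrom_length, Nat.sub_self, List.getElem_singleton]
      rw [Nat.mod_self]
      have ha : (x :: rest).getD 0 0 < (x :: rest).getD rest.length 0 := by
        rw [hgd 0 (by simp), hgd rest.length (by simp)]
        exact hmono 0 rest.length (by simp) (by simp) hr0
      have hb0 : 0 ≤ (x :: rest).getD 0 0 := by
        rw [hgd 0 (by simp)]
        exact (hbnd _ (List.getElem_mem _)).1
      have hb1 : (x :: rest).getD rest.length 0 < (rhythm.length : Int) := by
        rw [hgd rest.length (by simp)]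
        exact (hbnd _ (List.getElem_mem _)).2
      have hd0 : (x :: rest).getD 0 0 = x := rfl
      rw [PySem.Int.mod_eq_emod_of_pos hn]
      have hrw : ((x :: rest).getD 0 0 - (x :: rest).getD rest.length 0) % (rhythm.length : Int)
          = ((x :: rest).getD 0 0 - (x :: rest).getD rest.length 0 + (rhythm.length : Int))
            % (rhythm.length : Int) := by
        rw [Int.add_emod_right]
      rw [hrw]
      rw [Int.emod_eq_of_lt (by omega) (by omega), hd0, hlastD, hgd rest.length (by simp)]
      ring

theorem B_unfold (rhythm : List Int) :
    adjacent_edges_alt rhythm = (circN (gapsOf (idxOf rhythm) (rhythm.length : Int)) : Int) := by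
  unfold adjacent_edges_alt
  rw [scan_filter]
  rw [show (PySem.List.enumerate rhythm).filterMap
      (fun op => if op.2 == 1 then some op.1 else none) = idxOf rhythm from rfl]
  cases hL : idxOf rhythm with
  | nil =>
    simp [circN, gapsOf]
  | cons x rest =>
    have hgap := gaps_eq rhythm x rest hL
    rw [hL] at hgap
    rw [List.foldl_cons]
    simp only []
    rw [scan_diffs rest [] x x]
    simp only [List.nil_append, Option.getD_some]
    cases rest with
    | nil =>
      simp [circN, gapsOf, diffsFrom, List.getLastD_cons, List.range_succ]
    | cons y t =>
      rw [hgap (by simp)]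
      obtain ⟨a, tg, hgo⟩ : ∃ a tg,
          gapsOf (x :: y :: t) (rhythm.length : Int) = a :: tg := by
        cases h : gapsOf (x :: y :: t) (rhythm.length : Int) with
        | nil =>
          have : (gapsOf (x :: y :: t) (rhythm.length : Int)).length = t.length + 2 := by
            simp [gapsOf]
          rw [h] at this; simp at this
        | cons a tg => exact ⟨a, tg, rfl⟩
      rw [hgo]
      rw [List.foldl_cons]
      simp only [List.headD_cons, BEq.rfl, if_true, zero_add]
      have hr : (tg.foldl
            (fun (s : List (Int × Int) × Int × Int) g =>
              if g == s.2.1 then (s.1, s.2.1, s.2.2 + 1)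
              else (s.1 ++ [(s.2.1, s.2.2)], g, 1)) ([], a, 1)).1
          ++ [((tg.foldl
            (fun (s : List (Int × Int) × Int × Int) g =>
              if g == s.2.1 then (s.1, s.2.1, s.2.2 + 1)
              else (s.1 ++ [(s.2.1, s.2.2)], g, 1)) ([], a, 1)).2.1,
            (tg.foldl
            (fun (s : List (Int × Int) × Int × Int) g =>
              if g == s.2.1 then (s.1, s.2.1, s.2.2 + 1)
              else (s.1 ++ [(s.2.1, s.2.2)], g, 1)) ([], a, 1)).2.2)]
          = rleAux a 1 tg := by
        simpa using rle_foldl tg [] a 1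
      rw [hr]
      rw [show ((a :: tg).length : Int) = (tg.length : Int) + 1 from by simp]
      rw [apply_ite (List.foldl (fun (acc : Int) (vc : Int × Int) => acc + (vc.2 - 1)) 0)]
      exact rle_formula a tg (rleAux a 1 tg) rfl

-- ===== VERDICT (by name: the statement is the Claim_ definition above) =====
theorem adjacent_edges_spec : Claim_equal_adjacent_edges := by
  intro rhythm _
  unfold Spec_adjacent_edges
  rw [A_eq_circ, B_unfold]
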